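-- pv_equiv track=rewrite | github.com/dscaglionexcures/scripts | tools/recap.py | _lab_display_name
-- ===== SOURCE A (Python) =====
-- from typing import Any, Dict, List, Optional, Sequence
--
-- def _lab_display_name(row: Dict[str, Any]) -> str:
--     raw_codes = row.get("codes")
--     if isinstance(raw_codes, list):
--         standard_display = ""
--         fallback_display = ""
--         for code_obj in raw_codes:
--             if not isinstance(code_obj, dict):
--                 continue
--             display = str(code_obj.get("display") or "").strip()
--             if not display:
--                 continue
--             if not fallback_display:
--                 fallback_display = display
--             if str(code_obj.get("type") or "").strip().lower() == "standard":
--                 standard_display = display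
--                 break
--         if standard_display:
--             return standard_display
--         if fallback_display:
--             return fallback_display
--     return ""
-- ===== SOURCE B (Python) =====
-- def _lab_display_name(row):
--     raw_codes = row.get("codes")
--     if not isinstance(raw_codes, list):
--         return ""
--     valid = [
--         (display, str(code_obj.get("type") or "").strip().lower())
--         for code_obj in raw_codes
--         if isinstance(code_obj, dict)
--         for display in [str(code_obj.get("display") or "").strip()]
--         if display
--     ]
--     standard = next((d for d, t in valid if t == "standard"), "")
--     if standard:
--         return standard
--     if valid:
--         return valid[0][0]
--     return ""
-- ===== Notes on version B (the rewrite author's own statement) =====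
-- stated objective: alternative
-- what changed: Replaces the single stateful loop with break and two accumulators by a build-then-search decomposition: first a comprehension collects the valid (display, type) pairs, then next() finds the first 'standard' entry and the head of the list supplies the fallback.
import Mathlib
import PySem

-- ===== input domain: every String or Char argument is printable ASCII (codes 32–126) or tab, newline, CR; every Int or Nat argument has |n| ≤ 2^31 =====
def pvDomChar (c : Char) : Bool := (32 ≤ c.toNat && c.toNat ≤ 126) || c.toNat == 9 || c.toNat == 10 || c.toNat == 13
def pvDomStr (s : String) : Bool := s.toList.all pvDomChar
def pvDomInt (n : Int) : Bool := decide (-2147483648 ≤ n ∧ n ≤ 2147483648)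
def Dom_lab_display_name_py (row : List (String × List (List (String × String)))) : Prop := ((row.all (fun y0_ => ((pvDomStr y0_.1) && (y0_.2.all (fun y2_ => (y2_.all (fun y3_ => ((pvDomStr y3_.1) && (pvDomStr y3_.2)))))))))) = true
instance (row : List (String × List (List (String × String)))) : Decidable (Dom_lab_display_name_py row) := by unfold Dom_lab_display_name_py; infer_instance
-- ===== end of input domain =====

-- B replaces A's single stateful loop (two accumulators + break) by a build-then-search
-- decomposition: collect valid (display, type) pairs once, then search for 'standard',
-- else take the head. Objective: alternative (same cost, different structure).

-- ===== PORT A =====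
-- shared field extraction (both Pythons contain these exact expressions):
-- str(code_obj.get("display") or "").strip() — values are strings here, so str(·) is the
-- identity and 'or ""' maps None/"" to "".
def pvDisplay (c : List (String × String)) : String :=
  PySem.Str.strip (((PySem.Dict.mk c).get? "display").getD "")

-- str(code_obj.get("type") or "").strip().lower()
def pvTypeLower (c : List (String × String)) : String :=
  PySem.Str.lower (PySem.Str.strip (((PySem.Dict.mk c).get? "type").getD ""))

-- A's for-loop with its fallback accumulator; a hit on "standard" breaks and A then
-- returns standard_display (= that display); after the loop the tail returns
-- fallback_display if nonempty else "".
def lab_display_name_py_loop : List (List (String × String)) → String → String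
  | [], fb => if fb ≠ "" then fb else ""
  | c :: rest, fb =>
    if pvDisplay c = "" then lab_display_name_py_loop rest fb
    else if pvTypeLower c = "standard" then pvDisplay c
    else lab_display_name_py_loop rest (if fb = "" then pvDisplay c else fb)

def lab_display_name_py (row : List (String × List (List (String × String)))) : String :=
  match (PySem.Dict.mk row).get? "codes" with
  | some codes => lab_display_name_py_loop codes ""
  | none => ""

-- ===== PORT B =====
-- one element of Source B's 'valid' comprehension: some (display, type_lower) iff display nonempty
def pvB_entry (c : List (String × String)) : Option (String × String) :=
  if pvDisplay c = "" then none else some (pvDisplay c, pvTypeLower c)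

def lab_display_name_py_alt (row : List (String × List (List (String × String)))) : String :=
  match (PySem.Dict.mk row).get? "codes" with
  | none => ""
  | some codes =>
    let valid := codes.filterMap pvB_entry
    let standard := ((valid.find? (fun p => p.2 == "standard")).map (·.1)).getD ""
    if standard ≠ "" then standard
    else
      match valid with
      | [] => ""
      | p :: _ => p.1

-- ===== PRECONDITION & SPEC =====
def Spec_lab_display_name_py (row : List (String × List (List (String × String)))) (out : String) : Prop := out = lab_display_name_py_alt row
instance (row : List (String × List (List (String × String)))) (out : String) : Decidable (Spec_lab_display_name_py row out) := by unfold Spec_lab_display_name_py; infer_instance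

-- ===== CLAIM (what is proved, stated in full; the proofs are below) =====
def Claim_equal_lab_display_name_py : Prop := ∀ (row : List (String × List (List (String × String)))), Dom_lab_display_name_py row → Spec_lab_display_name_py row (lab_display_name_py row)

-- ===== LEMMAS AND PROOFS =====

theorem pvB_entry_fst_ne (c : List (String × String)) (p : String × String)
    (h : pvB_entry c = some p) : p.1 ≠ "" := by
  unfold pvB_entry at h
  by_cases hd : pvDisplay c = ""
  · simp [hd] at h
  · simp only [if_neg hd, Option.some.injEq] at h
    rw [← h]; exact hd

theorem mem_filterMap_entry_fst_ne {codes : List (List (String × String))}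
    {p : String × String} (h : p ∈ codes.filterMap pvB_entry) : p.1 ≠ "" := by
  rcases List.mem_filterMap.mp h with ⟨c, _, hc⟩
  exact pvB_entry_fst_ne c p hc

/-- A's loop computed from B's intermediate list: a found 'standard' wins; otherwise
the accumulator if nonempty, else the head of the valid list. -/
theorem loop_eq_search (codes : List (List (String × String))) :
    ∀ fb, lab_display_name_py_loop codes fb =
      match (codes.filterMap pvB_entry).find? (fun p => p.2 == "standard") with
      | some p => p.1
      | none =>
        if fb = "" then
          (match codes.filterMap pvB_entry with
           | [] => ""
           | p :: _ => p.1)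
        else fb := by
  induction codes with
  | nil =>
    intro fb
    simp only [lab_display_name_py_loop, List.filterMap_nil, List.find?_nil]
    by_cases h : fb = "" <;> simp [h]
  | cons c rest ih =>
    intro fb
    simp only [lab_display_name_py_loop, List.filterMap_cons]
    by_cases hd : pvDisplay c = ""
    · have he : pvB_entry c = none := by simp [pvB_entry, hd]
      rw [if_pos hd, he, ih fb]
    · have he : pvB_entry c = some (pvDisplay c, pvTypeLower c) := by simp [pvB_entry, hd]
      rw [if_neg hd, he]
      by_cases ht : pvTypeLower c = "standard"
      · rw [if_pos ht, List.find?_cons_of_pos (by simp [ht])]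
      · rw [if_neg ht, List.find?_cons_of_neg (by simp [ht]), ih]
        by_cases hfb : fb = ""
        · rw [if_pos hfb]
          cases hfind : (List.filterMap pvB_entry rest).find? (fun p => p.2 == "standard") <;>
            simp [hd]
        · rw [if_neg hfb]
          cases hfind : (List.filterMap pvB_entry rest).find? (fun p => p.2 == "standard") <;>
            simp [hfb]

-- ===== VERDICT (by name: the statement is the Claim_ definition above) =====
theorem lab_display_name_py_spec : Claim_equal_lab_display_name_py := by
  intro row _
  unfold Spec_lab_display_name_py lab_display_name_py lab_display_name_py_alt
  cases hg : (PySem.Dict.mk row).get? "codes" with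
  | none => simp
  | some codes =>
    simp only
    rw [loop_eq_search codes ""]
    cases hf : (codes.filterMap pvB_entry).find? (fun p => p.2 == "standard") with
    | none => simp
    | some p =>
      have hne : p.1 ≠ "" := mem_filterMap_entry_fst_ne (List.mem_of_find?_eq_some hf)
      simp [hne]
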